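-- pv_equiv track=rewrite | github.com/feliciaandersson/PhD | src/calculation/opt.py | create_label
-- ===== SOURCE A (Python) =====
-- def create_label(prefix, parameters, calc_type):
--     """Create a label for a calculation.
--
--     Args:
--         prefix (str): The prefix for the label.
--         parameters (list): The parameters for the label.
--         calc_type (str): The type of calculation.
--
--     Returns:
--         label (str): The created label.
--     """
--
--     method_label = "_".join(p for p in parameters if p is not None)
--
--     label = f"{prefix}_{method_label}_{calc_type}"
--
--     while "__" in label:
--         label = label.replace("__", "_")
--
--     if label.startswith("_"):
--         label = label[1:]
--
--     return label
-- ===== SOURCE B (Python) =====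
-- def create_label(prefix, parameters, calc_type):
--     method_label = "_".join(p for p in parameters if p is not None)
--     combined = f"{prefix}_{method_label}_{calc_type}"
--     out = []
--     for ch in combined:
--         if ch == "_" and out and out[-1] == "_":
--             continue
--         out.append(ch)
--     if out and out[0] == "_":
--         del out[0]
--     return "".join(out)
-- ===== Notes on version B (the rewrite author's own statement) =====
-- stated objective: alternative
-- what changed: The fixed-point loop of whole-string '__'->'_' replacements is replaced by a single left-to-right pass that appends each character but skips an underscore when the last appended character is already an underscore, collapsing every underscore run in one traversal.
import Mathlib
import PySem

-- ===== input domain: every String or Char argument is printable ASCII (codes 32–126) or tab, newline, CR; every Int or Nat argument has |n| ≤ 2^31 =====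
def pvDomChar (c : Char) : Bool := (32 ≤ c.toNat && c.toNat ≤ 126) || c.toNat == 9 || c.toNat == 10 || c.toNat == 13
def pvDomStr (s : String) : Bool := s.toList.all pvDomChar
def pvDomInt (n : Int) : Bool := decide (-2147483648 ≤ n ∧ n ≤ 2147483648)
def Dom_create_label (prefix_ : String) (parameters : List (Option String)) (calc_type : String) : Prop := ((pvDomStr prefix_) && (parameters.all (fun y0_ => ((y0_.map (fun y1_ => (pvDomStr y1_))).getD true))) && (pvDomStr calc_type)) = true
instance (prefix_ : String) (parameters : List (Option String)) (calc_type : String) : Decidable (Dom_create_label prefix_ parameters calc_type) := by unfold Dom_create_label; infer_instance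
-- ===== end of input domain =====

-- B replaces A's repeated while-"__"-replace scans by a single left-to-right pass that skips an
-- underscore whenever the previously kept character is an underscore (objective: alternative, same result).
-- ===== PORT A =====
def pvRep : List Char → List Char
  | [] => []
  | [c] => [c]
  | c :: d :: t => if c = '_' ∧ d = '_' then '_' :: pvRep t else c :: pvRep (d :: t)

lemma pvRep_go : ∀ (fuel : Nat) (l acc : List Char), l.length ≤ fuel →
    PySem.Chars.replace.go ['_','_'] ['_'] fuel l acc = acc.reverse ++ pvRep l := by
  intro fuel
  induction fuel with
  | zero =>
    intro l acc h
    have hl : l = [] := by cases l <;> simp_all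
    subst hl
    simp [PySem.Chars.replace.go, pvRep]
  | succ n ih =>
    intro l acc h
    cases l with
    | nil => simp [PySem.Chars.replace.go, pvRep]
    | cons c t =>
      cases t with
      | nil =>
        rw [PySem.Chars.replace.go]
        have hp : (['_','_'] : List Char).isPrefixOf [c] = false := by
          simp [List.isPrefixOf]
        simp only [hp, Bool.false_eq_true, if_false]
        rw [ih [] (c :: acc) (by simp)]
        simp [pvRep]
      | cons d t' =>
        by_cases hcd : c = '_' ∧ d = '_'
        · obtain ⟨hc, hd⟩ := hcd
          subst hc; subst hd
          rw [PySem.Chars.replace.go]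
          have hp : (['_','_'] : List Char).isPrefixOf ('_' :: '_' :: t') = true := by
            simp [List.isPrefixOf]
          simp only [hp, if_pos]
          rw [ih _ _ (by simp at h ⊢; omega)]
          simp [pvRep]
        · rw [PySem.Chars.replace.go]
          have hp : (['_','_'] : List Char).isPrefixOf (c :: d :: t') = false := by
            simp [List.isPrefixOf]
            intro hc hd; exact hcd ⟨hc.symm, hd.symm⟩
          simp only [hp, Bool.false_eq_true, if_false]
          rw [ih _ _ (by simp at h ⊢; omega)]
          simp [pvRep, hcd]

lemma replace_eq_pvRep (l : List Char) :
    PySem.Chars.replace l ['_','_'] ['_'] = pvRep l := by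
  rw [PySem.Chars.replace]
  simp only [List.isEmpty_cons, Bool.false_eq_true, if_false]
  simpa using pvRep_go l.length l [] le_rfl

lemma pvRep_length_le (l : List Char) : (pvRep l).length ≤ l.length := by
  fun_induction pvRep <;> simp_all <;> omega

lemma pvRep_length_lt (l : List Char) (h : ['_','_'] <:+: l) :
    (pvRep l).length < l.length := by
  fun_induction pvRep with
  | case1 => simp at h
  | case2 c =>
    exfalso
    have := h.length_le; simp at this
  | case3 c d t hcd ih =>
    obtain ⟨hc, hd⟩ := hcd
    subst hc; subst hd
    simp [pvRep]
    have := pvRep_length_le t; omega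
  | case4 c d t hcd ih =>
    rcases (List.infix_cons_iff).mp h with hp | hi
    · exfalso
      rcases hp with ⟨u, hu⟩
      cases hu
      exact hcd ⟨rfl, rfl⟩
    · have h2 := ih hi
      simp only [pvRep, if_neg hcd, List.length_cons] at *
      omega

def labelLoop (l : List Char) : List Char :=
  if h : PySem.Chars.isIn ['_','_'] l = true then
    labelLoop (PySem.Chars.replace l ['_','_'] ['_'])
  else l
termination_by l.length
decreasing_by
  rw [replace_eq_pvRep]
  exact pvRep_length_lt l ((PySem.Chars.isIn_iff_infix _ _).mp h)

def create_label (prefix_ : String) (parameters : List (Option String)) (calc_type : String) : String :=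
  let method_label := PySem.Str.join "_" (parameters.filterMap (fun p => p))
  let label := prefix_.toList ++ '_' :: method_label.toList ++ '_' :: calc_type.toList
  let label := labelLoop label
  let label := if PySem.Chars.startswith label ['_'] = true then
      PySem.Chars.slice label (some 1) none
    else label
  String.ofList label

-- ===== PORT B =====
def create_label_alt (prefix_ : String) (parameters : List (Option String)) (calc_type : String) : String :=
  let method_label := PySem.Str.join "_" (parameters.filterMap (fun p => p))
  let combined := prefix_.toList ++ '_' :: method_label.toList ++ '_' :: calc_type.toList
  let out := combined.foldl
    (fun acc c => if c = '_' ∧ acc.getLast? = some '_' then acc else acc ++ [c]) []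
  let out := if out.head? = some '_' then out.tail else out
  String.ofList out

-- ===== PRECONDITION & SPEC =====
def Spec_create_label (prefix_ : String) (parameters : List (Option String)) (calc_type : String) (out : String) : Prop := out = create_label_alt prefix_ parameters calc_type
instance (prefix_ : String) (parameters : List (Option String)) (calc_type : String) (out : String) : Decidable (Spec_create_label prefix_ parameters calc_type out) := by unfold Spec_create_label; infer_instance

-- ===== CLAIM (what is proved, stated in full; the proofs are below) =====
def Claim_equal_create_label : Prop := ∀ (prefix_ : String) (parameters : List (Option String)) (calc_type : String), Dom_create_label prefix_ parameters calc_type → Spec_create_label prefix_ parameters calc_type (create_label prefix_ parameters calc_type)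

-- ===== LEMMAS AND PROOFS =====
def squash : List Char → List Char
  | [] => []
  | [c] => [c]
  | c :: d :: t => if c = '_' ∧ d = '_' then squash (d :: t) else c :: squash (d :: t)

def squashFrom (last : Option Char) : List Char → List Char
  | [] => []
  | c :: t => if c = '_' ∧ last = some '_' then squashFrom last t else c :: squashFrom (some c) t

lemma squash_of_no_dd (l : List Char) (h : ¬ (['_','_'] <:+: l)) : squash l = l := by
  fun_induction squash with
  | case1 => rfl
  | case2 c => rfl
  | case3 c d t hcd ih =>
    exfalso; exact h ⟨[], t, by obtain ⟨hc, hd⟩ := hcd; subst hc; subst hd; rfl⟩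
  | case4 c d t hcd ih =>
    rw [ih (fun hi => h (List.infix_cons hi))]

lemma pvRep_head (d : Char) (t : List Char) : ∃ u, pvRep (d :: t) = d :: u := by
  cases t with
  | nil => exact ⟨[], rfl⟩
  | cons e u =>
    by_cases hde : d = '_' ∧ e = '_'
    · exact ⟨pvRep u, by obtain ⟨h1, h2⟩ := hde; subst h1; subst h2; simp [pvRep]⟩
    · exact ⟨pvRep (e :: u), by simp [pvRep, hde]⟩

lemma squash_pvRep : ∀ n : Nat,
    (∀ l : List Char, l.length = n → squash (pvRep l) = squash l) ∧
    (∀ t : List Char, t.length + 1 = n → squash ('_' :: pvRep t) = squash ('_' :: t)) := by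
  intro n
  induction n using Nat.strong_induction_on with
  | _ n ih =>
    constructor
    · intro l hl
      match l with
      | [] => rfl
      | [c] => rfl
      | c :: d :: t =>
        by_cases hcd : c = '_' ∧ d = '_'
        · obtain ⟨h1, h2⟩ := hcd; subst h1; subst h2
          have hT : squash ('_' :: pvRep t) = squash ('_' :: t) :=
            (ih (t.length + 1) (by simp at hl; omega)).2 t rfl
          simpa [pvRep, squash] using hT
        · obtain ⟨u, hu⟩ := pvRep_head d t
          have hS : squash (pvRep (d :: t)) = squash (d :: t) :=
            (ih (d :: t).length (by simp at hl ⊢; omega)).1 (d :: t) rfl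
          rw [show pvRep (c :: d :: t) = c :: pvRep (d :: t) from by simp [pvRep, hcd]]
          rw [hu, show squash (c :: d :: u) = c :: squash (d :: u) from by simp [squash, hcd],
              ← hu, hS]
          simp [squash, hcd]
    · intro t ht
      match t with
      | [] => rfl
      | c :: u =>
        by_cases hc : c = '_'
        · subst hc
          match u with
          | [] => rfl
          | e :: u' =>
            by_cases he : e = '_'
            · subst he
              have hT : squash ('_' :: pvRep u') = squash ('_' :: u') :=
                (ih (u'.length + 1) (by simp at ht; omega)).2 u' rfl
              simpa [pvRep, squash] using hT
            · have hT : squash ('_' :: pvRep (e :: u')) = squash ('_' :: e :: u') :=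
                (ih ((e :: u').length + 1) (by simp at ht ⊢; omega)).2 (e :: u') rfl
              rw [show pvRep ('_' :: e :: u') = '_' :: pvRep (e :: u') from by simp [pvRep, he]]
              rw [show squash ('_' :: '_' :: pvRep (e :: u')) = squash ('_' :: pvRep (e :: u'))
                    from by simp [squash]]
              rw [hT]
              simp [squash]
        · obtain ⟨u'', hu⟩ := pvRep_head c u
          have hS : squash (pvRep (c :: u)) = squash (c :: u) :=
            (ih (c :: u).length (by simp at ht ⊢; omega)).1 (c :: u) rfl
          rw [hu, show squash ('_' :: c :: u'') = '_' :: squash (c :: u'') from by simp [squash, hc],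
              ← hu, hS]
          simp [squash, hc]

lemma labelLoop_eq_squash (l : List Char) : labelLoop l = squash l := by
  fun_induction labelLoop with
  | case1 l h ih =>
    rw [ih, replace_eq_pvRep]
    exact (squash_pvRep l.length).1 l rfl
  | case2 l h =>
    exact (squash_of_no_dd l (fun hi => h ((PySem.Chars.isIn_iff_infix _ _).mpr hi))).symm

lemma foldl_bstep (l : List Char) : ∀ acc : List Char,
    l.foldl (fun acc c => if c = '_' ∧ acc.getLast? = some '_' then acc else acc ++ [c]) acc
      = acc ++ squashFrom acc.getLast? l := by
  induction l with
  | nil => intro acc; simp [squashFrom]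
  | cons c t ih =>
    intro acc
    simp only [List.foldl_cons, squashFrom]
    by_cases h : c = '_' ∧ acc.getLast? = some '_'
    · rw [if_pos h, if_pos h, ih]
    · rw [if_neg h, if_neg h, ih, List.getLast?_concat]
      simp

lemma squashFrom_some_of_ne (c : Char) (hc : c ≠ '_') (l : List Char) :
    squashFrom (some c) l = squashFrom none l := by
  cases l with
  | nil => rfl
  | cons d t =>
    simp only [squashFrom]
    rw [if_neg (by rintro ⟨h1, h2⟩; exact hc (by simpa using h2)),
        if_neg (by rintro ⟨h1, h2⟩; cases h2)]

lemma squash_eq_squashFrom (l : List Char) : squash l = squashFrom none l := by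
  fun_induction squash with
  | case1 => rfl
  | case2 c => simp [squashFrom]
  | case3 c d t hcd ih =>
    obtain ⟨h1, h2⟩ := hcd; subst h1; subst h2
    rw [ih]
    simp [squashFrom]
  | case4 c d t hcd ih =>
    rw [ih]
    have h0 : squashFrom none (c :: d :: t) = c :: squashFrom (some c) (d :: t) := by
      simp only [squashFrom]
      rw [if_neg (by rintro ⟨-, h⟩; cases h)]
    rw [h0]
    congr 1
    by_cases hc : c = '_'
    · subst hc
      have hd : d ≠ '_' := fun h => hcd ⟨rfl, h⟩
      show squashFrom none (d :: t) = squashFrom (some '_') (d :: t)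
      simp only [squashFrom]
      rw [if_neg (by rintro ⟨-, h⟩; cases h), if_neg (by rintro ⟨h1, -⟩; exact hd h1)]
    · exact (squashFrom_some_of_ne c hc (d :: t)).symm

lemma strip_eq (l : List Char) :
    (if PySem.Chars.startswith l ['_'] = true then PySem.Chars.slice l (some 1) none else l)
      = (if l.head? = some '_' then l.tail else l) := by
  cases l with
  | nil => simp [PySem.Chars.startswith, List.isPrefixOf]
  | cons c t =>
    by_cases hc : c = '_'
    · subst hc
      rw [if_pos (by simp [PySem.Chars.startswith, List.isPrefixOf]), if_pos (by simp)]
      simp [PySem.Chars.slice_eq_listSlice, PySem.List.slice_from_one]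
    · rw [if_neg (by simp [PySem.Chars.startswith, List.isPrefixOf]; exact fun h => hc h.symm),
          if_neg (by simp [hc])]

theorem create_label_eq_alt (prefix_ : String) (parameters : List (Option String)) (calc_type : String) :
    create_label prefix_ parameters calc_type = create_label_alt prefix_ parameters calc_type := by
  simp only [create_label, create_label_alt]
  rw [labelLoop_eq_squash, squash_eq_squashFrom, foldl_bstep]
  simp only [List.getLast?_nil, List.nil_append]
  exact congrArg String.ofList (strip_eq _)

-- ===== VERDICT (by name: the statement is the Claim_ definition above) =====
theorem create_label_spec : Claim_equal_create_label := by
  intro prefix_ parameters calc_type _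
  unfold Spec_create_label
  exact create_label_eq_alt prefix_ parameters calc_type
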